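-- pv_equiv track=rewrite | github.com/inclusionAI/AWorld | aworld/experimental/metalearning/knowledge/base_coder.py | _add_docstrings
-- ===== SOURCE A (Python) =====
-- def _add_docstrings(code: str) -> str:
--     """为函数和类添加文档字符串"""
--     lines = code.split('\n')
--     result_lines = []
--     i = 0
--
--     while i < len(lines):
--         line = lines[i].strip()
--
--         # 检查是否是函数或类定义
--         if line.startswith('def ') or line.startswith('class '):
--             result_lines.append(lines[i])
--             i += 1
--
--             # 检查下一行是否已有文档字符串
--             if i < len(lines) and '"""' not in lines[i]:
--                 # 获取缩进
--                 indent = len(lines[i-1]) - len(lines[i-1].lstrip())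
--                 indent_str = ' ' * (indent + 4)
--
--                 # 添加文档字符串
--                 if line.startswith('def '):
--                     func_name = line.split('(')[0].replace('def ', '')
--                     docstring = f'{indent_str}"""{func_name}函数的功能描述"""\n'
--                 else:  # class
--                     class_name = line.split('(')[0].split(':')[0].replace('class ', '')
--                     docstring = f'{indent_str}"""{class_name}类的功能描述"""\n'
--
--                 result_lines.append(docstring)
--         else:
--             result_lines.append(lines[i])
--             i += 1
--
--     return '\n'.join(result_lines)
-- ===== SOURCE B (Python) =====
-- def _add_docstrings(code: str) -> str:
--     """为函数和类添加文档字符串"""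
--     lines = code.split('\n')
--
--     def gap_doc(prev, cur):
--         s = prev.strip()
--         kw = 'def ' if s.startswith('def ') else 'class ' if s.startswith('class ') else None
--         if kw is None or '"""' in cur:
--             return None
--         head = s.split('(')[0]
--         if kw == 'class ':
--             head = head.split(':')[0]
--         name = head.replace(kw, '')
--         suffix = '函数的功能描述' if kw == 'def ' else '类的功能描述'
--         pad = ' ' * (len(prev) - len(prev.lstrip()) + 4)
--         return f'{pad}"""{name}{suffix}"""\n'
--
--     # stage 1: one decision per gap between adjacent lines
--     docs = [gap_doc(p, c) for p, c in zip(lines, lines[1:])]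
--     # stage 2: merge the decisions back between the lines
--     out = lines[:1]
--     for d, ln in zip(docs, lines[1:]):
--         if d is not None:
--             out.append(d)
--         out.append(ln)
--     return '\n'.join(out)
-- ===== Notes on version B (the rewrite author's own statement) =====
-- stated objective: alternative
-- what changed: Replaced A's single index-driven while loop (manual i += 1 bookkeeping with look-ahead insertion) by two staged passes: a pure decision pass over adjacent line pairs producing one optional docstring per gap, then a separate merge pass interleaving those decisions back between the lines; the per-branch f-strings are also unified into one keyword/suffix-parameterised builder.
import Mathlib
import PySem

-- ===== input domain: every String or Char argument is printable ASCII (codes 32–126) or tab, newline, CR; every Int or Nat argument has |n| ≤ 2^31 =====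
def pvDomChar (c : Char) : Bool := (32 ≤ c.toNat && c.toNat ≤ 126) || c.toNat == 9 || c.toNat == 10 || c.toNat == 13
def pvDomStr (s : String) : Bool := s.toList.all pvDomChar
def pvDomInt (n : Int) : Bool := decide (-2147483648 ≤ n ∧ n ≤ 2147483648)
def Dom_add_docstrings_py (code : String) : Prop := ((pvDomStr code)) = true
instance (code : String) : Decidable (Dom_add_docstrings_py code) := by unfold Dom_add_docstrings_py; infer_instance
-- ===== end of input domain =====

-- B replaces A's single index-driven while loop (look-ahead insertion with manual i += 1 bookkeeping)
-- by two staged passes: a pure decision pass producing one optional docstring per gap between adjacent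
-- lines, then a merge pass interleaving those decisions back between the lines (objective: alternative).

-- ===== PORT A =====
-- A's docstring-insertion step: given the def/class line `l` (raw) and the next line `next`,
-- return the docstring line(s) to insert.  `line` is lines[i].strip() of the def line.
def pvDocA (l next : List Char) : List (List Char) :=
  if !PySem.Chars.isIn "\"\"\"".toList next then
    let indent := l.length - (PySem.Chars.lstrip l).length
    let indentStr := List.replicate (indent + 4) ' '
    let line := PySem.Chars.strip l
    if PySem.Chars.startswith line "def ".toList then
      let funcName := PySem.Chars.replace ((PySem.Chars.splitOn line ['(']).headD []) "def ".toList []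
      [indentStr ++ "\"\"\"".toList ++ funcName ++ "函数的功能描述\"\"\"\n".toList]
    else
      let className := PySem.Chars.replace
        ((PySem.Chars.splitOn ((PySem.Chars.splitOn line ['(']).headD []) [':']).headD []) "class ".toList []
      [indentStr ++ "\"\"\"".toList ++ className ++ "类的功能描述\"\"\"\n".toList]
  else []

-- A's while loop: the index i advances by one each iteration; lines[i-1] is the head just consumed,
-- lines[i] (the look-ahead) is the head of the remaining list.
def pvGoA : List (List Char) → List (List Char)
  | [] => []
  | l :: rest =>
    if PySem.Chars.startswith (PySem.Chars.strip l) "def ".toList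
        || PySem.Chars.startswith (PySem.Chars.strip l) "class ".toList then
      l :: ((match rest with
             | [] => []
             | next :: _ => pvDocA l next) ++ pvGoA rest)
    else
      l :: pvGoA rest

def add_docstrings_py (code : String) : String :=
  String.ofList (PySem.Chars.join ['\n'] (pvGoA (PySem.Chars.splitOn code.toList ['\n'])))

-- ===== PORT B =====
-- B's stage-1 decision: the optional docstring for the gap between `prev` and `cur`.
def pvGapDoc (prev cur : List Char) : Option (List Char) :=
  let s := PySem.Chars.strip prev
  let kw : Option (List Char) :=
    if PySem.Chars.startswith s "def ".toList then some "def ".toList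
    else if PySem.Chars.startswith s "class ".toList then some "class ".toList
    else none
  match kw with
  | none => none
  | some k =>
    if PySem.Chars.isIn "\"\"\"".toList cur then none
    else
      let head := (PySem.Chars.splitOn s ['(']).headD []
      let head := if k = "class ".toList then (PySem.Chars.splitOn head [':']).headD [] else head
      let name := PySem.Chars.replace head k []
      let suffix := if k = "def ".toList then "函数的功能描述".toList else "类的功能描述".toList
      let pad := List.replicate (prev.length - (PySem.Chars.lstrip prev).length + 4) ' '
      some (pad ++ "\"\"\"".toList ++ name ++ suffix ++ "\"\"\"\n".toList)

-- B's stage-2 merge: interleave the per-gap decisions back between the tail lines.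
def pvMergeB : List (Option (List Char) × List Char) → List (List Char)
  | [] => []
  | (d, ln) :: rest =>
    (match d with | none => [] | some doc => [doc]) ++ ln :: pvMergeB rest

def add_docstrings_py_alt (code : String) : String :=
  let lines := PySem.Chars.splitOn code.toList ['\n']
  let docs := (lines.zip lines.tail).map (fun pc => pvGapDoc pc.1 pc.2)
  String.ofList (PySem.Chars.join ['\n'] (lines.take 1 ++ pvMergeB (docs.zip lines.tail)))

-- ===== PRECONDITION & SPEC =====
def Spec_add_docstrings_py (code : String) (out : String) : Prop := out = add_docstrings_py_alt code
instance (code : String) (out : String) : Decidable (Spec_add_docstrings_py code out) := by unfold Spec_add_docstrings_py; infer_instance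

-- ===== CLAIM (what is proved, stated in full; the proofs are below) =====
def Claim_equal_add_docstrings_py : Prop := ∀ (code : String), Dom_add_docstrings_py code → Spec_add_docstrings_py code (add_docstrings_py code)

-- ===== LEMMAS AND PROOFS =====

-- A's per-line inserted material, written with B's decision function.
lemma pvDocA_eq_gapDoc (l next : List Char)
    (h : (PySem.Chars.startswith (PySem.Chars.strip l) "def ".toList
          || PySem.Chars.startswith (PySem.Chars.strip l) "class ".toList) = true) :
    pvDocA l next = (match pvGapDoc l next with | none => [] | some doc => [doc]) := by
  unfold pvDocA pvGapDoc
  by_cases hd : PySem.Chars.startswith (PySem.Chars.strip l) ['d','e','f',' '] = true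
  · by_cases hq : PySem.Chars.isIn ['\"','\"','\"'] next = true
    · simp [hd, hq]
    · have hq' := Bool.eq_false_iff.mpr hq
      have e1 : ("函数的功能描述\"\"\"\n".toList : List Char)
           = "函数的功能描述".toList ++ "\"\"\"\n".toList := by decide
      simp [hd, hq', e1]
  · have hd' := Bool.eq_false_iff.mpr hd
    have hc : PySem.Chars.startswith (PySem.Chars.strip l) ['c','l','a','s','s',' '] = true := by
      rcases Bool.or_eq_true _ _ |>.mp h with h1 | h1
      · exact absurd h1 hd
      · exact h1
    by_cases hq : PySem.Chars.isIn ['\"','\"','\"'] next = true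
    · simp [hd', hc, hq]
    · have hq' := Bool.eq_false_iff.mpr hq
      have hk : (['c','l','a','s','s',' '] : List Char) ≠ ['d','e','f',' '] := by decide
      have e2 : ("类的功能描述\"\"\"\n".toList : List Char)
           = "类的功能描述".toList ++ "\"\"\"\n".toList := by decide
      simp [hd', hc, hq', hk, e2]

lemma pvGapDoc_none_of_not_defclass (prev cur : List Char)
    (h : (PySem.Chars.startswith (PySem.Chars.strip prev) "def ".toList
          || PySem.Chars.startswith (PySem.Chars.strip prev) "class ".toList) = false) :
    pvGapDoc prev cur = none := by
  rcases Bool.or_eq_false_iff.mp h with ⟨h1, h2⟩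
  have h1' : PySem.Chars.startswith (PySem.Chars.strip prev) ['d','e','f',' '] = false := h1
  have h2' : PySem.Chars.startswith (PySem.Chars.strip prev) ['c','l','a','s','s',' '] = false := h2
  unfold pvGapDoc
  simp [h1', h2']

-- A's loop after the first line, phrased against B's merge of per-gap decisions.
lemma pvGoA_tail (rest : List (List Char)) : ∀ (l : List Char),
    pvGoA (l :: rest) =
      l :: pvMergeB ((((l :: rest).zip rest).map (fun pc => pvGapDoc pc.1 pc.2)).zip rest) := by
  induction rest with
  | nil =>
    intro l
    by_cases h : (PySem.Chars.startswith (PySem.Chars.strip l) "def ".toList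
        || PySem.Chars.startswith (PySem.Chars.strip l) "class ".toList) = true
    · simp [pvGoA, pvMergeB]
    · simp [pvGoA, pvMergeB]
  | cons next r ih =>
    intro l
    have unf : pvGoA (l :: next :: r) =
        (if (PySem.Chars.startswith (PySem.Chars.strip l) "def ".toList
             || PySem.Chars.startswith (PySem.Chars.strip l) "class ".toList) = true then
          l :: (pvDocA l next ++ pvGoA (next :: r))
        else l :: pvGoA (next :: r)) := rfl
    rw [unf]
    by_cases h : (PySem.Chars.startswith (PySem.Chars.strip l) "def ".toList
        || PySem.Chars.startswith (PySem.Chars.strip l) "class ".toList) = true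
    · rw [if_pos h, ih next, pvDocA_eq_gapDoc l next h]
      simp [List.zip_cons_cons, pvMergeB]
    · rw [if_neg h, ih next]
      simp [List.zip_cons_cons, pvMergeB,
        pvGapDoc_none_of_not_defclass l next (Bool.eq_false_iff.mpr h)]

lemma pvGoA_eq_staged (ls : List (List Char)) :
    pvGoA ls = ls.take 1 ++ pvMergeB (((ls.zip ls.tail).map (fun pc => pvGapDoc pc.1 pc.2)).zip ls.tail) := by
  cases ls with
  | nil => rfl
  | cons l rest => simpa using pvGoA_tail rest l

-- ===== VERDICT (by name: the statement is the Claim_ definition above) =====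
theorem add_docstrings_py_spec : Claim_equal_add_docstrings_py := by
  intro code _
  show add_docstrings_py code = add_docstrings_py_alt code
  unfold add_docstrings_py add_docstrings_py_alt
  rw [pvGoA_eq_staged]
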